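-- pv_equiv track=rewrite | github.com/kallebefelipe/graph-algorithms | lista-grafos-1/questao-1.py | has_parallel_arcs
-- ===== SOURCE A (Python) =====
-- def has_parallel_arcs(grafo):
--     for no in grafo:
--         lista = []
--         for v in no:
--             if v not in lista:
--                 lista.append(v)
--             else:
--                 return True
--     return False
-- ===== SOURCE B (Python) =====
-- def has_parallel_arcs(grafo):
--     for no in grafo:
--         s = sorted(no)
--         for a, b in zip(s, s[1:]):
--             if a == b:
--                 return True
--     return False
-- ===== Notes on version B (the rewrite author's own statement) =====
-- stated objective: alternative
-- what changed: Per node, B sorts the adjacency list and scans adjacent pairs for an equal neighbour, instead of A's incremental seen-list with a linear membership test per element.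
import Mathlib
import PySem

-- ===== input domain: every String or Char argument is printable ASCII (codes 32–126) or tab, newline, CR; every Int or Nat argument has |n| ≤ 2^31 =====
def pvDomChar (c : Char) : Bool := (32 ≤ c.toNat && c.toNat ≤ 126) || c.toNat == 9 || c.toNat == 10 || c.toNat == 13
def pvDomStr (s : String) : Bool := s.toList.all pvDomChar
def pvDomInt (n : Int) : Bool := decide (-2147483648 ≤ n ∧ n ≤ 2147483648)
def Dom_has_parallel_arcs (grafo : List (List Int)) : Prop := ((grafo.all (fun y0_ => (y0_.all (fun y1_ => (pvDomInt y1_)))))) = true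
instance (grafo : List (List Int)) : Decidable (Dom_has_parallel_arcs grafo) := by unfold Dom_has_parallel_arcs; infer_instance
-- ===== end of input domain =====

-- B detects a parallel arc per node by sorting the node's list and scanning adjacent pairs for
-- an equal neighbour, instead of A's incremental seen-list with a membership test per element
-- (objective: alternative).

-- ===== PORT A =====
-- inner loop of A over one node's list: lista is the seen-list, returns true on first repeat
def hpaInner : List Int → List Int → Bool
  | [], _ => false
  | v :: vs, lista => if v ∈ lista then true else hpaInner vs (lista ++ [v])

def has_parallel_arcs : List (List Int) → Bool
  | [] => false
  | no :: rest => if hpaInner no [] then true else has_parallel_arcs rest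

-- ===== PORT B =====
-- per node: s = sorted(no); if any adjacent pair of s (zip(s, s[1:])) is equal, return True
def has_parallel_arcs_alt : List (List Int) → Bool
  | [] => false
  | no :: rest =>
    let s := PySem.List.sorted no (fun x => x) false
    if (s.zip (PySem.List.slice s (some 1) none)).any (fun p => p.1 == p.2) then true
    else has_parallel_arcs_alt rest

-- ===== PRECONDITION & SPEC =====
def Spec_has_parallel_arcs (grafo : List (List Int)) (out : Bool) : Prop := out = has_parallel_arcs_alt grafo
instance (grafo : List (List Int)) (out : Bool) : Decidable (Spec_has_parallel_arcs grafo out) := by unfold Spec_has_parallel_arcs; infer_instance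

-- ===== CLAIM =====
def Claim_equal_has_parallel_arcs : Prop := ∀ (grafo : List (List Int)), Dom_has_parallel_arcs grafo → Spec_has_parallel_arcs grafo (has_parallel_arcs grafo)

-- ===== LEMMAS AND PROOFS =====

-- A's inner loop with a duplicate-free seen-list detects exactly "s ++ vs has a duplicate"
theorem hpaInner_eq_nodup (vs : List Int) (s : List Int) (hs : s.Nodup) :
    hpaInner vs s = decide ¬ (s ++ vs).Nodup := by
  induction vs generalizing s with
  | nil => simp [hpaInner, hs]
  | cons v vs ih =>
    simp only [hpaInner]
    by_cases hv : v ∈ s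
    · simp only [hv, if_true]
      have hnot : ¬ (s ++ v :: vs).Nodup := by
        intro h
        exact List.disjoint_of_nodup_append h hv (List.mem_cons_self ..)
      simp [hnot]
    · simp only [hv, if_false]
      have hs' : (s ++ [v]).Nodup := by
        simp [List.nodup_append, hs]
        intro a ha hav
        exact hv (hav ▸ ha)
      rw [ih (s ++ [v]) hs']
      simp only [List.append_assoc, List.singleton_append]

-- the adjacent-equal scan on a ≤-sorted list detects exactly "not Nodup"
theorem adjScan_sorted (l : List Int) (hl : l.Pairwise (· ≤ ·)) :
    ((l.zip l.tail).any (fun p => p.1 == p.2)) = decide ¬ l.Nodup := by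
  induction l with
  | nil => simp
  | cons a t ih =>
    cases t with
    | nil => simp
    | cons b u =>
      have htl : (b :: u).Pairwise (· ≤ ·) := (List.pairwise_cons.mp hl).2
      have hab : a ≤ b := (List.pairwise_cons.mp hl).1 b (by simp)
      simp only [List.tail_cons, List.zip_cons_cons, List.any_cons]
      by_cases heq : a = b
      · subst heq
        have hnot : ¬ (a :: a :: u).Nodup := by simp
        simp [hnot]
      · have habq : (a == b) = false := by simpa using heq
        have hnm : a ∉ b :: u := by
          intro hmem
          rcases List.mem_cons.mp hmem with rfl | hu
          · exact heq rfl
          · exact heq (le_antisymm hab ((List.pairwise_cons.mp htl).1 a hu))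
        have hih := ih htl
        simp only [List.tail_cons] at hih
        rw [habq, Bool.false_or, hih]
        have hnd : (a :: b :: u).Nodup ↔ (b :: u).Nodup := by
          simp [List.nodup_cons, hnm]
        simp only [hnd]

theorem hpa_eq (grafo : List (List Int)) :
    has_parallel_arcs grafo = has_parallel_arcs_alt grafo := by
  induction grafo with
  | nil => rfl
  | cons no rest ih =>
    simp only [has_parallel_arcs, has_parallel_arcs_alt, PySem.List.slice_from_one]
    have hA : hpaInner no [] = decide ¬ no.Nodup := by
      rw [hpaInner_eq_nodup no [] (List.nodup_nil)]
      simp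
    have hsortp : (PySem.List.sorted no (fun x => x) false).Pairwise (· ≤ ·) :=
      PySem.List.sorted_pairwise no (fun x => x)
    have hperm : (PySem.List.sorted no (fun x => x) false).Perm no :=
      PySem.List.sorted_perm no (fun x => x) false
    have hB := adjScan_sorted _ hsortp
    rw [hA, hB]
    simp only [hperm.nodup_iff, ih]

-- ===== VERDICT =====
theorem has_parallel_arcs_spec : Claim_equal_has_parallel_arcs := by
  intro grafo _
  exact hpa_eq grafo
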